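-- pv_equiv track=rewrite | github.com/Hotsheetiq/chat-5.0-review-ai-chat | improved_address_detection.py | suggest_closest_address
-- ===== SOURCE A (Python) =====
-- def suggest_closest_address(user_input):
--     """Suggest the closest matching address from known properties"""
--
--     known_addresses = [
--         "29 Port Richmond Avenue",
--         "31 Port Richmond Avenue",
--         "122 Targee Street",
--         "189 Court Street Richmond",
--         "2940 Richmond Avenue",
--         "2944 Richmond Avenue",
--         "2938 Richmond Avenue"
--     ]
--
--     # Simple matching based on key words
--     input_lower = user_input.lower()
--
--     # Check for specific patterns
--     if "richmond" in input_lower: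
--         if any(num in input_lower for num in ["29", "twenty nine"]):
--             return "29 Port Richmond Avenue"
--         elif any(num in input_lower for num in ["31", "thirty one"]):
--             return "31 Port Richmond Avenue"
--         elif any(num in input_lower for num in ["2940", "two nine four zero", "164", "46", "640", "4640"]):
--             return "2940 Richmond Avenue"
--         elif any(num in input_lower for num in ["2944", "two nine four four"]):
--             return "2944 Richmond Avenue"
--         elif any(num in input_lower for num in ["2938", "two nine three eight"]):
--             return "2938 Richmond Avenue"
--         elif "court" in input_lower and any(num in input_lower for num in ["189", "one eight nine"]):
--             return "189 Court Street Richmond"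
--
--     if "targee" in input_lower or "target" in input_lower:
--         if any(num in input_lower for num in ["122", "one twenty two"]):
--             return "122 Targee Street"
--
--     # Return None if no clear match
--     return None
-- ===== SOURCE B (Python) =====
-- KEYWORDS = [
--     "richmond", "targee", "target", "court",
--     "29", "twenty nine", "31", "thirty one",
--     "2940", "two nine four zero", "164", "46", "640", "4640",
--     "2944", "two nine four four", "2938", "two nine three eight",
--     "189", "one eight nine", "122", "one twenty two",
-- ]
--
--
-- def _decide(found):
--     """Decide the address from the set of keywords found (no string scans here)."""
--     if "richmond" in found:
--         if found & {"29", "twenty nine"}: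
--             return "29 Port Richmond Avenue"
--         if found & {"31", "thirty one"}:
--             return "31 Port Richmond Avenue"
--         if found & {"2940", "two nine four zero", "164", "46", "640", "4640"}:
--             return "2940 Richmond Avenue"
--         if found & {"2944", "two nine four four"}:
--             return "2944 Richmond Avenue"
--         if found & {"2938", "two nine three eight"}:
--             return "2938 Richmond Avenue"
--         if "court" in found and found & {"189", "one eight nine"}:
--             return "189 Court Street Richmond"
--     if found & {"targee", "target"} and found & {"122", "one twenty two"}:
--         return "122 Targee Street"
--     return None
--
--
-- def suggest_closest_address(user_input):
--     # Stage 1: one left-to-right scan over the input collecting every keyword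
--     # that occurs anywhere in it (startswith at each position).
--     s = user_input.lower()
--     found = set()
--     for i in range(len(s)):
--         for kw in KEYWORDS:
--             if kw not in found and s.startswith(kw, i):
--                 found.add(kw)
--     # Stage 2: decide purely from the found-keyword set.
--     return _decide(found)
-- ===== Notes on version B (the rewrite author's own statement) =====
-- stated objective: alternative
-- what changed: B splits the work into two stages: a single positional scan of the lowercased input that collects the set of all keyword substrings occurring in it (startswith at each index), followed by a decision computed purely from that set via set-membership and set-intersection tests, instead of A's on-demand substring searches interleaved with a nested if/elif chain.
import Mathlib
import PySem

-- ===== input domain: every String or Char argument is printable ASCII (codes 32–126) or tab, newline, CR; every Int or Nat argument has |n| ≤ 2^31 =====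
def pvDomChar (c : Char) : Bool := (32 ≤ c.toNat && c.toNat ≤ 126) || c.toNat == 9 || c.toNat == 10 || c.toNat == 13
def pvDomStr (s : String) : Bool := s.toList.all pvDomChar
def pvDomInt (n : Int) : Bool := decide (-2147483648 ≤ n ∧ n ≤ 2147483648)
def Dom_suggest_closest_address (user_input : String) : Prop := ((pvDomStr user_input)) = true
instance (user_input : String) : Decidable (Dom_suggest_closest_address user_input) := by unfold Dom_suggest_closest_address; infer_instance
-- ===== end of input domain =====

-- B replaces A's on-demand substring searches inside a nested if/elif chain by two stages:
-- one positional scan collecting the set of keywords occurring in the input, then a decision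
-- computed purely from that set (alternative decomposition, same behaviour).

-- ===== PORT A =====
def suggest_closest_address (user_input : String) : Option String :=
  let input_lower := PySem.Str.lower user_input
  -- the code after the richmond block (reached by fall-through when no elif fires)
  let rest : Option String :=
    if PySem.Str.isIn "targee" input_lower || PySem.Str.isIn "target" input_lower then
      if ["122", "one twenty two"].any (fun num => PySem.Str.isIn num input_lower) then
        some "122 Targee Street"
      else none
    else none
  if PySem.Str.isIn "richmond" input_lower then
    if ["29", "twenty nine"].any (fun num => PySem.Str.isIn num input_lower) then
      some "29 Port Richmond Avenue"
    else if ["31", "thirty one"].any (fun num => PySem.Str.isIn num input_lower) then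
      some "31 Port Richmond Avenue"
    else if ["2940", "two nine four zero", "164", "46", "640", "4640"].any
        (fun num => PySem.Str.isIn num input_lower) then
      some "2940 Richmond Avenue"
    else if ["2944", "two nine four four"].any (fun num => PySem.Str.isIn num input_lower) then
      some "2944 Richmond Avenue"
    else if ["2938", "two nine three eight"].any (fun num => PySem.Str.isIn num input_lower) then
      some "2938 Richmond Avenue"
    else if PySem.Str.isIn "court" input_lower &&
        ["189", "one eight nine"].any (fun num => PySem.Str.isIn num input_lower) then
      some "189 Court Street Richmond"
    else rest
  else rest

-- ===== PORT B =====
def pvKeywords : List String :=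
  ["richmond", "targee", "target", "court",
   "29", "twenty nine", "31", "thirty one",
   "2940", "two nine four zero", "164", "46", "640", "4640",
   "2944", "two nine four four", "2938", "two nine three eight",
   "189", "one eight nine", "122", "one twenty two"]

-- stage 1 of Source B: for i in range(len(s)): for kw in KEYWORDS: if kw not in found and s.startswith(kw, i): found.add(kw)
-- (s.startswith(kw, i) is ported exactly as: kw.toList is a prefix of s.drop i)
def pvScan (s : List Char) : PySem.Set String :=
  (List.range s.length).foldl
    (fun found i =>
      pvKeywords.foldl
        (fun f kw =>
          if !(PySem.Set.contains f kw) && PySem.Chars.startswith (s.drop i) kw.toList then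
            PySem.Set.add f kw
          else f)
        found)
    PySem.Set.empty

-- truthiness of `found & {...}` in Source B
def pvHit (found : PySem.Set String) (alts : List String) : Bool :=
  !(PySem.Set.inter found (PySem.Set.ofList alts)).isEmpty

-- stage 2 of Source B (_decide): decision from the keyword set only
def pvDecide (found : PySem.Set String) : Option String :=
  let rest : Option String :=
    if pvHit found ["targee", "target"] && pvHit found ["122", "one twenty two"] then
      some "122 Targee Street"
    else none
  if PySem.Set.contains found "richmond" then
    if pvHit found ["29", "twenty nine"] then some "29 Port Richmond Avenue"
    else if pvHit found ["31", "thirty one"] then some "31 Port Richmond Avenue"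
    else if pvHit found ["2940", "two nine four zero", "164", "46", "640", "4640"] then
      some "2940 Richmond Avenue"
    else if pvHit found ["2944", "two nine four four"] then some "2944 Richmond Avenue"
    else if pvHit found ["2938", "two nine three eight"] then some "2938 Richmond Avenue"
    else if PySem.Set.contains found "court" && pvHit found ["189", "one eight nine"] then
      some "189 Court Street Richmond"
    else rest
  else rest

def suggest_closest_address_alt (user_input : String) : Option String :=
  let s := PySem.Str.lower user_input
  pvDecide (pvScan s.toList)

-- ===== PRECONDITION & SPEC =====
def Spec_suggest_closest_address (user_input : String) (out : Option String) : Prop := out = suggest_closest_address_alt user_input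
instance (user_input : String) (out : Option String) : Decidable (Spec_suggest_closest_address user_input out) := by unfold Spec_suggest_closest_address; infer_instance

-- ===== CLAIM (what is proved, stated in full; the proofs are below) =====
def Claim_equal_suggest_closest_address : Prop := ∀ (user_input : String), Dom_suggest_closest_address user_input → Spec_suggest_closest_address user_input (suggest_closest_address user_input)

-- ===== LEMMAS AND PROOFS =====

-- one step of the inner keyword loop
theorem pvStep_mem (s : List Char) (i : Nat) (k kw : String) (f : PySem.Set String) :
    kw ∈ (if !(PySem.Set.contains f k) && PySem.Chars.startswith (s.drop i) k.toList then
            PySem.Set.add f k else f) ↔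
      kw ∈ f ∨ (kw = k ∧ PySem.Chars.startswith (s.drop i) k.toList = true) := by
  cases hcb : PySem.Set.contains f k with
  | false =>
    cases hpb : PySem.Chars.startswith (s.drop i) k.toList with
    | false =>
      rw [if_neg (by simp)]
      constructor
      · exact Or.inl
      · rintro (h | ⟨rfl, hP⟩)
        · exact h
        · exact Bool.noConfusion hP
    | true =>
      rw [if_pos (by simp), PySem.Set.mem_add]
      constructor
      · rintro (h | rfl)
        · exact Or.inl h
        · exact Or.inr ⟨rfl, rfl⟩
      · rintro (h | ⟨rfl, -⟩)
        · exact Or.inl h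
        · exact Or.inr rfl
  | true =>
    have hm : k ∈ f := (PySem.Set.contains_iff f k).1 hcb
    rw [if_neg (by simp)]
    constructor
    · exact Or.inl
    · rintro (h | ⟨rfl, -⟩)
      · exact h
      · exact hm

-- membership after the inner keyword loop at one position
theorem pvMem_inner (s : List Char) (i : Nat) (kws : List String) (f : PySem.Set String) (kw : String) :
    kw ∈ kws.foldl
        (fun f k =>
          if !(PySem.Set.contains f k) && PySem.Chars.startswith (s.drop i) k.toList then
            PySem.Set.add f k
          else f) f ↔
      kw ∈ f ∨ (kw ∈ kws ∧ PySem.Chars.startswith (s.drop i) kw.toList = true) := by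
  induction kws generalizing f with
  | nil => simp
  | cons k rest ih =>
    simp only [List.foldl_cons, ih, pvStep_mem, List.mem_cons]
    constructor
    · rintro ((h | ⟨rfl, hp⟩) | ⟨hk, hp⟩)
      · exact Or.inl h
      · exact Or.inr ⟨Or.inl rfl, hp⟩
      · exact Or.inr ⟨Or.inr hk, hp⟩
    · rintro (h | ⟨rfl | hk, hp⟩)
      · exact Or.inl (Or.inl h)
      · exact Or.inl (Or.inr ⟨rfl, hp⟩)
      · exact Or.inr ⟨hk, hp⟩

-- membership after the outer position loop
theorem pvMem_outer (s : List Char) (n : Nat) (f : PySem.Set String) (kw : String) :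
    kw ∈ (List.range n).foldl
        (fun found i =>
          pvKeywords.foldl
            (fun f k =>
              if !(PySem.Set.contains f k) && PySem.Chars.startswith (s.drop i) k.toList then
                PySem.Set.add f k
              else f) found) f ↔
      kw ∈ f ∨ (kw ∈ pvKeywords ∧ ∃ i < n, PySem.Chars.startswith (s.drop i) kw.toList = true) := by
  induction n generalizing f with
  | zero => simp
  | succ n ih =>
    rw [List.range_succ, List.foldl_append, List.foldl_cons, List.foldl_nil, pvMem_inner, ih]
    constructor
    · rintro ((h | ⟨hk, i, hi, hp⟩) | ⟨hk, hp⟩)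
      · exact Or.inl h
      · exact Or.inr ⟨hk, i, Nat.lt_succ_of_lt hi, hp⟩
      · exact Or.inr ⟨hk, n, Nat.lt_succ_self n, hp⟩
    · rintro (h | ⟨hk, i, hi, hp⟩)
      · exact Or.inl (Or.inl h)
      · rcases Nat.lt_succ_iff_lt_or_eq.1 hi with hi' | rfl
        · exact Or.inl (Or.inr ⟨hk, i, hi', hp⟩)
        · exact Or.inr ⟨hk, hp⟩

-- pvScan collects exactly the keywords that occur in s
theorem pvMem_scan (s : List Char) (kw : String) (hkw : kw ∈ pvKeywords) (hne : kw.toList ≠ []) :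
    (kw ∈ pvScan s) ↔ PySem.Chars.isIn kw.toList s = true := by
  unfold pvScan
  rw [pvMem_outer]
  simp only [PySem.Set.empty, List.not_mem_nil, false_or]
  constructor
  · rintro ⟨-, i, -, hp⟩
    exact (PySem.Chars.exists_prefix_drop_iff_isIn kw.toList s).1
      ⟨i, (PySem.Chars.startswith_iff _ _).1 hp⟩
  · intro h
    rcases (PySem.Chars.exists_prefix_drop_iff_isIn kw.toList s).2 h with ⟨j, hj⟩
    refine ⟨hkw, j, ?_, (PySem.Chars.startswith_iff _ _).2 hj⟩
    by_contra hlt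
    have hnil : s.drop j = [] := List.drop_eq_nil_of_le (Nat.le_of_not_lt hlt)
    rw [hnil, List.prefix_nil] at hj
    exact hne hj

-- Set.contains on pvScan equals the Python substring test, for each keyword of the table
theorem pvContains_scan (u : String) (kw : String) (hkw : kw ∈ pvKeywords) (hne : kw.toList ≠ []) :
    PySem.Set.contains (pvScan u.toList) kw = PySem.Str.isIn kw u := by
  have h1 : (kw ∈ pvScan u.toList) ↔ PySem.Str.isIn kw u = true := by
    rw [pvMem_scan u.toList kw hkw hne, PySem.Chars.isIn_iff_infix, ← PySem.Str.isIn_iff_infix]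
  cases hb : PySem.Str.isIn kw u with
  | false =>
    cases hcb : PySem.Set.contains (pvScan u.toList) kw with
    | false => rfl
    | true =>
      have hT : PySem.Str.isIn kw u = true := h1.1 ((PySem.Set.contains_iff _ _).1 hcb)
      rw [hb] at hT
      exact Bool.noConfusion hT
  | true => exact (PySem.Set.contains_iff _ _).2 (h1.2 hb)

-- non-emptiness of the intersection = some alternative is in found
theorem pvHit_iff (found : PySem.Set String) (alts : List String) :
    pvHit found alts = alts.any (fun a => PySem.Set.contains found a) := by
  unfold pvHit
  by_cases h : ∃ a ∈ alts, a ∈ found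
  · rcases h with ⟨a, ha, haf⟩
    have h1 : a ∈ PySem.Set.inter found (PySem.Set.ofList alts) :=
      (PySem.Set.mem_inter _ _ _).2 ⟨haf, (PySem.Set.mem_ofList _ _).2 ha⟩
    have h2 : (PySem.Set.inter found (PySem.Set.ofList alts)).isEmpty = false := by
      cases hE : (PySem.Set.inter found (PySem.Set.ofList alts)) with
      | nil => rw [hE] at h1; cases h1
      | cons x xs => rfl
    rw [h2]
    have : alts.any (fun a => PySem.Set.contains found a) = true := by
      rw [List.any_eq_true]
      exact ⟨a, ha, (PySem.Set.contains_iff _ _).2 haf⟩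
    rw [this]; rfl
  · have h2 : (PySem.Set.inter found (PySem.Set.ofList alts)) = [] := by
      cases hE : (PySem.Set.inter found (PySem.Set.ofList alts)) with
      | nil => rfl
      | cons x xs =>
        exfalso
        have hx : x ∈ PySem.Set.inter found (PySem.Set.ofList alts) := by
          rw [hE]; exact List.mem_cons_self
        rcases (PySem.Set.mem_inter _ _ _).1 hx with ⟨hxf, hxa⟩
        exact h ⟨x, (PySem.Set.mem_ofList _ _).1 hxa, hxf⟩
    rw [h2]
    have : alts.any (fun a => PySem.Set.contains found a) = false := by
      rw [List.any_eq_false]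
      intro a ha
      simp only [Bool.not_eq_true]
      by_contra hc
      exact h ⟨a, ha, (PySem.Set.contains_iff _ _).1 (Bool.of_not_eq_false hc)⟩
    rw [this]; rfl

-- the two decision trees over the shared boolean tests agree
theorem pvKey (r g1 g2 g3 g4 g5 c g6 t g7 : Bool) :
    (if r then
       if g1 then some "29 Port Richmond Avenue"
       else if g2 then some "31 Port Richmond Avenue"
       else if g3 then some "2940 Richmond Avenue"
       else if g4 then some "2944 Richmond Avenue"
       else if g5 then some "2938 Richmond Avenue"
       else if c && g6 then some "189 Court Street Richmond"
       else if t then if g7 then some "122 Targee Street" else none else none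
     else if t then if g7 then some "122 Targee Street" else none else none) =
    (if r then
       if g1 then some "29 Port Richmond Avenue"
       else if g2 then some "31 Port Richmond Avenue"
       else if g3 then some "2940 Richmond Avenue"
       else if g4 then some "2944 Richmond Avenue"
       else if g5 then some "2938 Richmond Avenue"
       else if c && g6 then some "189 Court Street Richmond"
       else if t && g7 then some "122 Targee Street" else none
     else if t && g7 then some "122 Targee Street" else (none : Option String)) := by
  cases r <;> cases t <;> cases c <;> cases g1 <;> cases g2 <;> cases g3 <;> cases g4 <;>
    cases g5 <;> cases g6 <;> cases g7 <;> rfl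

-- ===== VERDICT (by name: the statement is the Claim_ definition above) =====
theorem suggest_closest_address_spec : Claim_equal_suggest_closest_address := by
  intro u _
  unfold Spec_suggest_closest_address suggest_closest_address suggest_closest_address_alt pvDecide
  have hc := fun kw hkw hne => pvContains_scan (PySem.Str.lower u) kw hkw hne
  simp only [pvHit_iff]
  rw [hc "richmond" (by decide) (by decide), hc "court" (by decide) (by decide)]
  simp only [List.any_cons, List.any_nil,
    hc "29" (by decide) (by decide), hc "twenty nine" (by decide) (by decide),
    hc "31" (by decide) (by decide), hc "thirty one" (by decide) (by decide),
    hc "2940" (by decide) (by decide), hc "two nine four zero" (by decide) (by decide),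
    hc "164" (by decide) (by decide), hc "46" (by decide) (by decide),
    hc "640" (by decide) (by decide), hc "4640" (by decide) (by decide),
    hc "2944" (by decide) (by decide), hc "two nine four four" (by decide) (by decide),
    hc "2938" (by decide) (by decide), hc "two nine three eight" (by decide) (by decide),
    hc "189" (by decide) (by decide), hc "one eight nine" (by decide) (by decide),
    hc "122" (by decide) (by decide), hc "one twenty two" (by decide) (by decide),
    hc "targee" (by decide) (by decide), hc "target" (by decide) (by decide),
    Bool.or_false]
  exact pvKey _ _ _ _ _ _ _ _ _ _
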